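-- pv_equiv track=rewrite | github.com/emc255/python-algorithm-design | questions/medium/dictionary/minimum_increment_to_make_array_unique.py | minimum_increment_for_unique_v2
-- ===== SOURCE A (Python) =====
-- from collections import Counter
--
-- def minimum_increment_for_unique_v2(nums: list[int]) -> int:
--     result = 0
--     counter_numbers = Counter(nums)
--     set_numbers = set(counter_numbers.keys())
--     sorted_counter_numbers = dict(sorted(counter_numbers.items()))
--     for k, v in sorted_counter_numbers.items():
--         for i in range(v - 1):
--             num = k
--             while num in set_numbers:
--                 num += 1
--             set_numbers.add(num)
--             result += num - k
--
--     return result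
-- ===== SOURCE B (Python) =====
-- def minimum_increment_for_unique_v2(nums: list[int]) -> int:
--     total = 0
--     prev = None
--     for x in sorted(nums):
--         if prev is not None and x <= prev:
--             total += prev + 1 - x
--             prev = prev + 1
--         else:
--             prev = x
--     return total
-- ===== Notes on version B (the rewrite author's own statement) =====
-- stated objective: faster
-- what changed: Replaced the Counter + hash-set linear free-slot search (quadratic on duplicate-heavy input) with sort-then-greedy: one pass over sorted(nums) bumping each element to max(x, prev+1) and accumulating the differences.
import Mathlib
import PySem

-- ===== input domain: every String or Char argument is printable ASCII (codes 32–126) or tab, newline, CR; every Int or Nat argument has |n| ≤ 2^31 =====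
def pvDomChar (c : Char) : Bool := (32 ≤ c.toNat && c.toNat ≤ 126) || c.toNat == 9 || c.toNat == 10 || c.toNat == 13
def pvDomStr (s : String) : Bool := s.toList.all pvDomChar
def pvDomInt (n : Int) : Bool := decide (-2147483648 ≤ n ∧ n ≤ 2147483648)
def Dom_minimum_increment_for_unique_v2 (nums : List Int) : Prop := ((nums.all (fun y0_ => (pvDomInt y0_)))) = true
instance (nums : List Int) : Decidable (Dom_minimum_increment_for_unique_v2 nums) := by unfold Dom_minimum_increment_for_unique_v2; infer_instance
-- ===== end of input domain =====

-- B replaces A's Counter + hash-set upward free-slot search (quadratic on duplicate-heavy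
-- input) by a single greedy pass over sorted(nums) bumping each element to max(x, prev+1).

-- ===== PORT A =====

-- termination helper for the 'while num in set_numbers: num += 1' loop: the number of
-- set members ≥ num strictly shrinks when num ∈ set.
theorem pvCountGE_lt (l : List Int) (num : Int) (h : num ∈ l) :
    l.countP (fun z => decide (num + 1 ≤ z)) < l.countP (fun z => decide (num ≤ z)) := by
  induction l with
  | nil => cases h
  | cons a t ih =>
    simp only [List.countP_cons]
    have hmono : t.countP (fun z => decide (num + 1 ≤ z)) ≤ t.countP (fun z => decide (num ≤ z)) :=
      List.countP_mono_left (by intro x _ hx; simp only [decide_eq_true_eq] at hx ⊢; omega)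
    by_cases hmem : num ∈ t
    · have := ih hmem
      by_cases h1 : num + 1 ≤ a
      · rw [if_pos (by simp only [decide_eq_true_eq]; omega),
            if_pos (by simp only [decide_eq_true_eq]; omega)]
        omega
      · by_cases h2 : num ≤ a
        · rw [if_neg (by simp only [decide_eq_true_eq]; omega),
              if_pos (by simp only [decide_eq_true_eq]; omega)]
          omega
        · rw [if_neg (by simp only [decide_eq_true_eq]; omega),
              if_neg (by simp only [decide_eq_true_eq]; omega)]
          omega
    · rcases List.mem_cons.mp h with h' | h'
      · subst h'
        rw [if_neg (by simp only [decide_eq_true_eq]; omega),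
            if_pos (by simp only [decide_eq_true_eq]; omega)]
        omega
      · exact absurd h' hmem

-- while num in set_numbers: num += 1
def pvFindFree (S : PySem.Set Int) (num : Int) : Int :=
  if S.contains num then pvFindFree S (num + 1) else num
termination_by S.countP (fun z => decide (num ≤ z))
decreasing_by
  rename_i h
  exact pvCountGE_lt S num ((PySem.Set.contains_iff S num).mp h)

-- Counter(nums); set(counter.keys()); dict(sorted(counter.items())).
-- 'sorted(counter.items())' compares (key, count) tuples; Counter keys are distinct, so
-- tuple comparison never reaches the second component: sorting by the key is exact here.
def minimum_increment_for_unique_v2 (nums : List Int) : Int :=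
  let counterNumbers := PySem.Dict.counter nums
  let setNumbers : PySem.Set Int := PySem.Set.ofList counterNumbers.keys
  let sortedCounterNumbers :=
    (PySem.List.sorted counterNumbers.items (fun p => p.1) false).foldl
      (fun d p => d.insert p.1 p.2) PySem.Dict.empty
  let st := sortedCounterNumbers.items.foldl
    (fun (st : PySem.Set Int × Int) kv =>
      (PySem.List.pyRange 0 (kv.2 - 1)).foldl
        (fun st _i =>
          let num := pvFindFree st.1 kv.1
          (st.1.add num, st.2 + (num - kv.1))) st)
    (setNumbers, 0)
  st.2

-- ===== PORT B =====
def minimum_increment_for_unique_v2_alt (nums : List Int) : Int :=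
  ((PySem.List.sorted nums (fun x => x) false).foldl
    (fun (st : Int × Option Int) x =>
      match st.2 with
      | some p => if x ≤ p then (st.1 + (p + 1 - x), some (p + 1)) else (st.1, some x)
      | none => (st.1, some x))
    (0, none)).1

-- ===== PRECONDITION & SPEC =====
def Spec_minimum_increment_for_unique_v2 (nums : List Int) (out : Int) : Prop := out = minimum_increment_for_unique_v2_alt nums
instance (nums : List Int) (out : Int) : Decidable (Spec_minimum_increment_for_unique_v2 nums out) := by unfold Spec_minimum_increment_for_unique_v2; infer_instance

-- ===== CLAIM (what is proved, stated in full; the proofs are below) =====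
def Claim_equal_minimum_increment_for_unique_v2 : Prop := ∀ (nums : List Int), Dom_minimum_increment_for_unique_v2 nums → Spec_minimum_increment_for_unique_v2 nums (minimum_increment_for_unique_v2 nums)

-- ===== LEMMAS AND PROOFS =====

-- Abstract "first fit" model: place each element x at the least free slot ≥ x of a finite
-- occupied set; both programs are bridged to runs of this model, whose total is invariant
-- under permutation of the insertion order.

theorem pvNfpEx (S : Finset ℤ) (x : ℤ) : ∃ n : ℕ, x + (n : ℤ) ∉ S := by
  by_contra h
  simp only [not_exists, not_not] at h
  have hinj : Set.InjOn (fun n : ℕ => x + (n : ℤ)) (Finset.range (S.card + 1)) := by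
    intro a _ b _ hab; simpa using hab
  have hmap : ∀ n ∈ Finset.range (S.card + 1), x + (n : ℤ) ∈ S := fun n _ => h n
  have := Finset.card_le_card_of_injOn _ hmap hinj
  simp at this

noncomputable def pvNfp (S : Finset ℤ) (x : ℤ) : ℤ := x + (Nat.find (pvNfpEx S x) : ℤ)

theorem pvNfp_not_mem (S : Finset ℤ) (x : ℤ) : pvNfp S x ∉ S := Nat.find_spec (pvNfpEx S x)

theorem pvNfp_le (S : Finset ℤ) (x : ℤ) : x ≤ pvNfp S x := by
  unfold pvNfp
  exact le_add_of_nonneg_right (by positivity)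

theorem pvNfp_mem_of_lt (S : Finset ℤ) (x y : ℤ) (hxy : x ≤ y) (hy : y < pvNfp S x) : y ∈ S := by
  unfold pvNfp at hy
  have hlt : (y - x).toNat < Nat.find (pvNfpEx S x) := by omega
  have h := Nat.find_min (pvNfpEx S x) hlt
  rw [not_not] at h
  have he : x + (((y - x).toNat : ℕ) : ℤ) = y := by omega
  rwa [he] at h

theorem pvNfp_eq (S : Finset ℤ) (x y : ℤ) (hxy : x ≤ y) (hnot : y ∉ S)
    (hfill : ∀ z, x ≤ z → z < y → z ∈ S) : pvNfp S x = y := by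
  have h1 : pvNfp S x ≤ y := by
    by_contra h
    exact hnot (pvNfp_mem_of_lt S x y hxy (by omega))
  have h2 : y ≤ pvNfp S x := by
    by_contra h
    exact pvNfp_not_mem S x (hfill _ (pvNfp_le S x) (by omega))
  omega

theorem pvNfp_mem_step (S : Finset ℤ) (x : ℤ) (h : x ∈ S) : pvNfp S x = pvNfp S (x + 1) := by
  apply pvNfp_eq
  · have := pvNfp_le S (x + 1); omega
  · exact pvNfp_not_mem S (x + 1)
  · intro z hz1 hz2
    by_cases hz : z = x
    · exact hz ▸ h
    · exact pvNfp_mem_of_lt S (x + 1) z (by omega) hz2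

theorem pvNfp_insert (S : Finset ℤ) (c x : ℤ) (_hc : c ∉ S) :
    pvNfp (insert c S) x = if pvNfp S x = c then pvNfp S (c + 1) else pvNfp S x := by
  split_ifs with h
  · apply pvNfp_eq
    · have h1 := pvNfp_le S x
      have h2 := pvNfp_le S (c + 1)
      omega
    · intro hmem
      rcases Finset.mem_insert.mp hmem with h' | h'
      · have := pvNfp_le S (c + 1); omega
      · exact pvNfp_not_mem S (c + 1) h'
    · intro z hz1 hz2
      by_cases hzc : z = c
      · exact Finset.mem_insert.mpr (Or.inl hzc)
      · apply Finset.mem_insert.mpr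
        right
        by_cases hzl : z < c
        · exact pvNfp_mem_of_lt S x z hz1 (by omega)
        · exact pvNfp_mem_of_lt S (c + 1) z (by omega) hz2
  · apply pvNfp_eq
    · exact pvNfp_le S x
    · intro hmem
      rcases Finset.mem_insert.mp hmem with h' | h'
      · exact h h'
      · exact pvNfp_not_mem S x h'
    · intro z hz1 hz2
      exact Finset.mem_insert.mpr (Or.inr (pvNfp_mem_of_lt S x z hz1 hz2))

noncomputable def pvStep (st : Finset ℤ × ℤ) (x : ℤ) : Finset ℤ × ℤ :=
  (insert (pvNfp st.1 x) st.1, st.2 + (pvNfp st.1 x - x))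

noncomputable def pvRun (st : Finset ℤ × ℤ) (l : List ℤ) : Finset ℤ × ℤ := l.foldl pvStep st

theorem pvStep_comm (st : Finset ℤ × ℤ) (x y : ℤ) :
    pvStep (pvStep st x) y = pvStep (pvStep st y) x := by
  obtain ⟨S, r⟩ := st
  simp only [pvStep]
  have hx := pvNfp_not_mem S x
  have hy := pvNfp_not_mem S y
  rw [pvNfp_insert S _ y hx, pvNfp_insert S _ x hy]
  by_cases h : pvNfp S y = pvNfp S x
  · rw [if_pos h, if_pos h.symm, h]
    simp only [Prod.mk.injEq]
    exact ⟨trivial, by ring⟩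
  · rw [if_neg h, if_neg (fun e => h e.symm)]
    simp only [Prod.mk.injEq]
    exact ⟨Finset.insert_comm _ _ _, by ring⟩

theorem pvRun_perm (st : Finset ℤ × ℤ) (l₁ l₂ : List ℤ) (h : l₁.Perm l₂) :
    pvRun st l₁ = pvRun st l₂ := by
  haveI : RightCommutative pvStep := ⟨fun s a b => pvStep_comm s a b⟩
  exact h.foldl_eq st

theorem pvRun_append (st : Finset ℤ × ℤ) (l₁ l₂ : List ℤ) :
    pvRun st (l₁ ++ l₂) = pvRun (pvRun st l₁) l₂ := List.foldl_append

-- inserting pairwise-distinct fresh keys places each at itself, at no cost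
theorem pvRun_fresh (ks : List ℤ) (S : Finset ℤ) (r : ℤ) (hnd : ks.Nodup)
    (hdis : ∀ k ∈ ks, k ∉ S) : pvRun (S, r) ks = (S ∪ ks.toFinset, r) := by
  induction ks generalizing S r with
  | nil => simp [pvRun]
  | cons k t ih =>
    have hk : pvNfp S k = k :=
      pvNfp_eq S k k le_rfl (hdis k List.mem_cons_self) (by intro z h1 h2; omega)
    have hstep : pvStep (S, r) k = (insert k S, r) := by
      simp [pvStep, hk]
    simp only [pvRun, List.foldl_cons] at *
    rw [hstep, ih (insert k S) r (List.Nodup.of_cons hnd)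
      (by
        intro k' hk' hmem
        rcases Finset.mem_insert.mp hmem with h' | h'
        · exact (List.nodup_cons.mp hnd).1 (h' ▸ hk')
        · exact hdis k' (List.mem_cons_of_mem _ hk') h')]
    rw [List.toFinset_cons, Finset.insert_union, Finset.union_insert]

-- ---- bridge: port A to the abstract model ----

theorem pvToFinset_add (S : PySem.Set Int) (x : Int) :
    (S.add x).toFinset = insert x S.toFinset := by
  rw [PySem.Set.add_eq_ite]
  split_ifs with h
  · rw [Finset.insert_eq_self.mpr (List.mem_toFinset.mpr h)]
  · ext z
    simp [List.toFinset_append]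

theorem pvFindFree_eq (S : PySem.Set Int) (x : Int) : pvFindFree S x = pvNfp S.toFinset x := by
  induction x using pvFindFree.induct S with
  | case1 num h ih =>
    rw [pvFindFree, if_pos h, ih,
      ← pvNfp_mem_step _ _ (List.mem_toFinset.mpr ((PySem.Set.contains_iff S num).mp h))]
  | case2 num h =>
    rw [pvFindFree, if_neg h]
    refine (pvNfp_eq _ _ _ le_rfl ?_ (by intro z h1 h2; omega)).symm
    intro hmem
    exact h ((PySem.Set.contains_iff S num).mpr (List.mem_toFinset.mp hmem))

def pvInnerF (k : Int) : (PySem.Set Int × Int) → Int → (PySem.Set Int × Int) :=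
  fun st _i =>
    let num := pvFindFree st.1 k
    (st.1.add num, st.2 + (num - k))

theorem pvInner_eq (k : Int) (l : List Int) (S : PySem.Set Int) (r : ℤ) :
    (((l.foldl (pvInnerF k) (S, r)).1.toFinset, (l.foldl (pvInnerF k) (S, r)).2) : Finset ℤ × ℤ)
      = pvRun (S.toFinset, r) (List.replicate l.length k) := by
  induction l generalizing S r with
  | nil => simp [pvRun]
  | cons a t ih =>
    have hnum : pvFindFree S k = pvNfp S.toFinset k := pvFindFree_eq S k
    have h1 : pvInnerF k (S, r) a = (S.add (pvFindFree S k), r + (pvFindFree S k - k)) := rfl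
    have h2 : pvRun (S.toFinset, r) (k :: List.replicate t.length k)
        = pvRun ((S.add (pvFindFree S k)).toFinset, r + (pvFindFree S k - k))
            (List.replicate t.length k) := by
      simp only [pvRun, List.foldl_cons]
      congr 1
      simp [pvStep, hnum, pvToFinset_add]
    simp only [List.foldl_cons, List.length_cons, List.replicate_succ]
    rw [h1, h2]
    exact ih _ _

def pvOuterF : (PySem.Set Int × Int) → (Int × Int) → (PySem.Set Int × Int) :=
  fun st kv => (PySem.List.pyRange 0 (kv.2 - 1)).foldl (pvInnerF kv.1) st

def pvDups (kcs : List (Int × Int)) : List Int :=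
  kcs.flatMap (fun kv => List.replicate (PySem.List.pyRange 0 (kv.2 - 1)).length kv.1)

theorem pvOuter_eq (kcs : List (Int × Int)) (S : PySem.Set Int) (r : ℤ) :
    (((kcs.foldl pvOuterF (S, r)).1.toFinset, (kcs.foldl pvOuterF (S, r)).2) : Finset ℤ × ℤ)
      = pvRun (S.toFinset, r) (pvDups kcs) := by
  induction kcs generalizing S r with
  | nil => simp [pvRun, pvDups]
  | cons kv t ih =>
    simp only [List.foldl_cons, pvDups, List.flatMap_cons]
    rw [pvRun_append]
    have hin := pvInner_eq kv.1 (PySem.List.pyRange 0 (kv.2 - 1)) S r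
    rw [← hin]
    have hOuter : pvOuterF (S, r) kv
        = ((PySem.List.pyRange 0 (kv.2 - 1)).foldl (pvInnerF kv.1) (S, r)) := rfl
    rw [hOuter]
    have := ih ((PySem.List.pyRange 0 (kv.2 - 1)).foldl (pvInnerF kv.1) (S, r)).1
      ((PySem.List.pyRange 0 (kv.2 - 1)).foldl (pvInnerF kv.1) (S, r)).2
    simpa [pvDups] using this

-- ---- the multiset of insertions of A is exactly nums ----

theorem pvSumIf (a : Int) (l : List Int) (g : Int → ℕ) (hnd : l.Nodup) :
    (l.map (fun k => if a = k then g k else 0)).sum = if a ∈ l then g a else 0 := by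
  induction l with
  | nil => simp
  | cons k t ih =>
    simp only [List.map_cons, List.sum_cons]
    by_cases h : a = k
    · subst h
      rw [if_pos rfl, if_pos List.mem_cons_self,
        ih (List.Nodup.of_cons hnd)]
      rw [if_neg (List.nodup_cons.mp hnd).1]
      omega
    · rw [if_neg h, ih (List.Nodup.of_cons hnd)]
      simp [List.mem_cons, h]

theorem pvKeysDups_perm (nums : List Int) :
    (PySem.Set.ofList nums ++ pvDups ((PySem.Set.ofList nums).map
      (fun k => (k, (nums.count k : Int))))).Perm nums := by
  rw [List.perm_iff_count]
  intro a
  rw [List.count_append]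
  have hnd := PySem.Set.nodup_ofList nums
  have hkeys : (PySem.Set.ofList nums).count a = if a ∈ nums then 1 else 0 := by
    by_cases ha : a ∈ nums
    · rw [if_pos ha]
      exact List.count_eq_one_of_mem hnd ((PySem.Set.mem_ofList nums a).mpr ha)
    · rw [if_neg ha]
      exact List.count_eq_zero_of_not_mem (fun h => ha ((PySem.Set.mem_ofList nums a).mp h))
  have hcomp : ∀ k : Int,
      List.count a
          (List.replicate (PySem.List.pyRange 0 ((nums.count k : Int) - 1)).length k)
        = if a = k then (PySem.List.pyRange 0 ((nums.count k : Int) - 1)).length else 0 := by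
    intro k
    by_cases h : a = k
    · subst h
      simp
    · simp [List.count_replicate, h, Ne.symm h]
  have hdups : (pvDups ((PySem.Set.ofList nums).map (fun k => (k, (nums.count k : Int))))).count a
      = if a ∈ nums then nums.count a - 1 else 0 := by
    unfold pvDups
    rw [List.count_flatMap, List.map_map]
    simp only [Function.comp_def]
    rw [List.map_congr_left (fun k _ => hcomp k),
      pvSumIf a _ (fun k => (PySem.List.pyRange 0 ((nums.count k : Int) - 1)).length) hnd]
    by_cases ha : a ∈ nums
    · rw [if_pos ((PySem.Set.mem_ofList nums a).mpr ha), if_pos ha]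
      have hpos : 0 < nums.count a := List.count_pos_iff.mpr ha
      have h1 : (nums.count a : Int) - 1 = ((nums.count a - 1 : Nat) : Int) := by
        omega
      rw [h1, PySem.List.pyRange_zero_natCast]
      simp
    · rw [if_neg (fun h => ha ((PySem.Set.mem_ofList nums a).mp h)), if_neg ha]
  rw [hkeys, hdups]
  by_cases ha : a ∈ nums
  · have hpos : 0 < nums.count a := List.count_pos_iff.mpr ha
    rw [if_pos ha, if_pos ha]
    omega
  · rw [if_neg ha, if_neg ha, List.count_eq_zero_of_not_mem ha]

-- ---- bridge: port B to the abstract model ----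

def pvBStep : (Int × Option Int) → Int → (Int × Option Int) :=
  fun st x =>
    match st.2 with
    | some p => if x ≤ p then (st.1 + (p + 1 - x), some (p + 1)) else (st.1, some x)
    | none => (st.1, some x)

theorem pvRunB (l : List ℤ) (S : Finset ℤ) (p total : ℤ)
    (hl : l.Pairwise (· ≤ ·)) (hS : ∀ z ∈ S, z ≤ p)
    (hfull : ∀ x ∈ l, ∀ z, x ≤ z → z ≤ p → z ∈ S) :
    (pvRun (S, total) l).2 = (l.foldl pvBStep (total, some p)).1 := by
  induction l generalizing S p total with
  | nil => simp [pvRun]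
  | cons x t ih =>
    obtain ⟨hx, ht⟩ := List.pairwise_cons.mp hl
    simp only [pvRun, List.foldl_cons, pvBStep]
    by_cases hxp : x ≤ p
    · have hnfp : pvNfp S x = p + 1 :=
        pvNfp_eq S x (p + 1) (by omega)
          (fun hmem => by have := hS _ hmem; omega)
          (fun z hz1 hz2 => hfull x List.mem_cons_self z hz1 (by omega))
      have hstep : pvStep (S, total) x = (insert (p + 1) S, total + (p + 1 - x)) := by
        simp [pvStep, hnfp]
      rw [hstep, if_pos hxp]
      exact ih (insert (p + 1) S) (p + 1) (total + (p + 1 - x)) ht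
        (by
          intro z hz
          rcases Finset.mem_insert.mp hz with h' | h'
          · omega
          · have := hS z h'; omega)
        (by
          intro y hy z hz1 hz2
          by_cases hzp : z = p + 1
          · exact hzp ▸ Finset.mem_insert_self _ _
          · exact Finset.mem_insert_of_mem
              (hfull y (List.mem_cons_of_mem _ hy) z hz1 (by omega)))
    · have hnfp : pvNfp S x = x :=
        pvNfp_eq S x x le_rfl (fun hmem => hxp (hS x hmem)) (by intro z h1 h2; omega)
      have hstep : pvStep (S, total) x = (insert x S, total + (x - x)) := by
        simp [pvStep, hnfp]
      have hx0 : total + (x - x) = total := by ring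
      rw [hstep, hx0, if_neg hxp]
      exact ih (insert x S) x total ht
        (by
          intro z hz
          rcases Finset.mem_insert.mp hz with h' | h'
          · omega
          · have := hS z h'; omega)
        (by
          intro y hy z hz1 hz2
          have hxy := hx y hy
          have : z = x := by omega
          exact this ▸ Finset.mem_insert_self _ _)

theorem pvB_eq (s : List ℤ) (hs : s.Pairwise (· ≤ ·)) :
    (pvRun (∅, 0) s).2 = (s.foldl pvBStep (0, none)).1 := by
  cases s with
  | nil => simp [pvRun]
  | cons x t =>
    obtain ⟨hx, ht⟩ := List.pairwise_cons.mp hs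
    simp only [pvRun, List.foldl_cons, pvBStep]
    have hnfp : pvNfp ∅ x = x :=
      pvNfp_eq ∅ x x le_rfl (by simp) (by intro z h1 h2; omega)
    have hstep : pvStep ((∅ : Finset ℤ), (0 : ℤ)) x = ({x}, 0) := by
      simp [pvStep, hnfp]
    rw [hstep]
    exact pvRunB t {x} x 0 ht (by simp)
      (by
        intro y hy z hz1 hz2
        have := hx y hy
        have : z = x := by omega
        simp [this])

-- ---- main ----

theorem pvMain (nums : List Int) :
    minimum_increment_for_unique_v2 nums = minimum_increment_for_unique_v2_alt nums := by
  have hnd : (PySem.Set.ofList nums).Nodup := PySem.Set.nodup_ofList nums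
  have hperm1 : (PySem.List.sorted (PySem.Dict.counter nums).items (fun p => p.1) false).Perm
      ((PySem.Dict.counter nums).items) := PySem.List.sorted_perm _ _ _
  have hitems : (PySem.Dict.counter nums).items
      = (PySem.Set.ofList nums).map (fun k => (k, (nums.count k : Int))) :=
    PySem.Dict.items_counter nums
  set kcs := PySem.List.sorted (PySem.Dict.counter nums).items (fun p => p.1) false with hkcs
  have hmapfst : (kcs.map Prod.fst).Perm (PySem.Set.ofList nums) := by
    have h := hperm1.map Prod.fst
    rw [hitems] at h
    simpa [List.map_map, Function.comp_def] using h
  have hndfst : (kcs.map Prod.fst).Nodup := hmapfst.nodup_iff.mpr hnd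
  have hdict : ((kcs.foldl (fun d p => d.insert p.1 p.2) PySem.Dict.empty)).items = kcs := by
    have h := PySem.Dict.items_foldl_insert_fresh kcs Prod.fst Prod.snd PySem.Dict.empty
      (fun a _ => rfl) hndfst
    simpa using h
  have hA : minimum_increment_for_unique_v2 nums
      = ((kcs.foldl pvOuterF (PySem.Set.ofList (PySem.Dict.counter nums).keys, 0)).2) := by
    simp only [minimum_increment_for_unique_v2]
    rw [hdict]
    rfl
  have hkeysSet : PySem.Set.ofList (PySem.Dict.counter nums).keys = PySem.Set.ofList nums := by
    rw [PySem.Dict.keys_counter]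
    exact PySem.Set.ofList_ofList nums
  have hout := pvOuter_eq kcs (PySem.Set.ofList nums) 0
  have hA2 : minimum_increment_for_unique_v2 nums
      = (pvRun ((PySem.Set.ofList nums).toFinset, 0) (pvDups kcs)).2 := by
    rw [hA, hkeysSet]
    exact congrArg Prod.snd hout
  have hfresh := pvRun_fresh (PySem.Set.ofList nums) ∅ 0 hnd (by simp)
  have hA3 : minimum_increment_for_unique_v2 nums
      = (pvRun (∅, 0) ((PySem.Set.ofList nums : List Int) ++ pvDups kcs)).2 := by
    rw [hA2, pvRun_append, hfresh, Finset.empty_union]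
  have hdupsPerm : (pvDups kcs).Perm
      (pvDups ((PySem.Set.ofList nums).map (fun k => (k, (nums.count k : Int))))) := by
    unfold pvDups
    exact List.Perm.flatMap_right _ (hitems ▸ hperm1)
  have hfullPerm : ((PySem.Set.ofList nums : List Int) ++ pvDups kcs).Perm nums :=
    (hdupsPerm.append_left (PySem.Set.ofList nums)).trans (pvKeysDups_perm nums)
  have hsortPerm : ((PySem.Set.ofList nums : List Int) ++ pvDups kcs).Perm
      (PySem.List.sorted nums (fun x => x) false) :=
    hfullPerm.trans (PySem.List.sorted_perm nums (fun x => x) false).symm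
  rw [hA3, pvRun_perm _ _ _ hsortPerm]
  exact pvB_eq _ (PySem.List.sorted_pairwise nums (fun x => x))

-- ===== VERDICT (by name: the statement is the Claim_ definition above) =====
theorem minimum_increment_for_unique_v2_spec : Claim_equal_minimum_increment_for_unique_v2 := by
  intro nums _
  exact pvMain nums
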